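-- pv_equiv track=rewrite | github.com/lucasbivar/coding-interviews | the-daily-byte/week_01/day_04_correct_capitalization.py | hasCorrectCapitalization
-- ===== SOURCE A (Python) =====
-- def isUpperCase(char):
--   #Time: O(1)
--   #Space: O(1)
--   if ord(char) >= 65 and ord(char) <= 90:
--     return True
--
--   return False
--
-- def hasCorrectCapitalization(str):
--   #Time: O(n)
--   #Space: O(1)
--   if len(str) <= 1: return True
--
--   isFirstUpper = isUpperCase(str[0])
--   hasUpperCase = False
--   hasLowerCase = False
--
--   for i in range(1, len(str)):
--     if isUpperCase(str[i]):
--       hasUpperCase = True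
--     else:
--       hasLowerCase = True
--
--   if isFirstUpper and not hasUpperCase and hasLowerCase: return True
--   if isFirstUpper and hasUpperCase and not hasLowerCase: return True
--   if not isFirstUpper and hasLowerCase and not hasUpperCase: return True
--
--   return False
-- ===== SOURCE B (Python) =====
-- def isUpperCase(char):
--   if ord(char) >= 65 and ord(char) <= 90:
--     return True
--   return False
--
-- def hasCorrectCapitalization(str):
--   if len(str) <= 1: return True
--   return all(not isUpperCase(c) for c in str[1:]) or all(isUpperCase(c) for c in str)
-- ===== Notes on version B (the rewrite author's own statement) =====
-- stated objective: simpler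
-- what changed: Replaces the two mutable hasUpper/hasLower flags and the three-way branch over them with a direct two-clause predicate: every character after the first is non-uppercase, or every character of the whole string is uppercase.
import Mathlib
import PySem

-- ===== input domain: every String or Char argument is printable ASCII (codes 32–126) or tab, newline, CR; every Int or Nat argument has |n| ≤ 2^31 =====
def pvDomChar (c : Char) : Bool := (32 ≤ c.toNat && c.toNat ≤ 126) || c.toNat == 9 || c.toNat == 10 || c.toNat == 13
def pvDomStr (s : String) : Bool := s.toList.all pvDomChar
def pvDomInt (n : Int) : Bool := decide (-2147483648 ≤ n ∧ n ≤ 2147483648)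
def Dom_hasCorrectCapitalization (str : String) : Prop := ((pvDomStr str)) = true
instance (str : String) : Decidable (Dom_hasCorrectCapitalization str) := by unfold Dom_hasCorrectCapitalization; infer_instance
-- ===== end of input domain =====

-- B replaces A's two mutable flags and three-way branch by a direct two-clause predicate (simpler decomposition, same O(n)).

-- ===== PORT A =====
def pvIsUpperCase (c : Char) : Bool :=
  if 65 ≤ c.toNat && c.toNat ≤ 90 then true else false

-- the range(1, len(str)) flag loop, as a fold over the tail characters
def pvFlagLoop (cs : List Char) : Bool × Bool :=
  cs.foldl (fun p c => if pvIsUpperCase c then (true, p.2) else (p.1, true)) (false, false)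

def hasCorrectCapitalization (str : String) : Bool :=
  let cs := str.toList
  if cs.length ≤ 1 then true
  else
    match cs with
    | [] => true
    | c0 :: rest =>
      let isFirstUpper := pvIsUpperCase c0
      let flags := pvFlagLoop rest
      let hasUpperCase := flags.1
      let hasLowerCase := flags.2
      if isFirstUpper && !hasUpperCase && hasLowerCase then true
      else if isFirstUpper && hasUpperCase && !hasLowerCase then true
      else if !isFirstUpper && hasLowerCase && !hasUpperCase then true
      else false

-- ===== PORT B =====
def hasCorrectCapitalization_alt (str : String) : Bool :=
  let cs := str.toList
  if cs.length ≤ 1 then true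
  else (cs.drop 1).all (fun c => !pvIsUpperCase c) || cs.all pvIsUpperCase

-- ===== PRECONDITION & SPEC =====
def Spec_hasCorrectCapitalization (str : String) (out : Bool) : Prop := out = hasCorrectCapitalization_alt str
instance (str : String) (out : Bool) : Decidable (Spec_hasCorrectCapitalization str out) := by unfold Spec_hasCorrectCapitalization; infer_instance

-- ===== CLAIM (what is proved, stated in full; the proofs are below) =====
def Claim_equal_hasCorrectCapitalization : Prop := ∀ (str : String), Dom_hasCorrectCapitalization str → Spec_hasCorrectCapitalization str (hasCorrectCapitalization str)

-- ===== LEMMAS AND PROOFS =====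

-- the flag loop computes (any upper, any non-upper), starting from any accumulator
theorem pvFlagLoop_acc (cs : List Char) (a b : Bool) :
    cs.foldl (fun p c => if pvIsUpperCase c then (true, p.2) else (p.1, true)) (a, b)
      = (a || cs.any pvIsUpperCase, b || cs.any (fun c => !pvIsUpperCase c)) := by
  induction cs generalizing a b with
  | nil => simp
  | cons c t ih =>
    simp only [List.foldl, List.any_cons]
    by_cases h : pvIsUpperCase c = true
    · simp [h, ih]
    · simp only [Bool.not_eq_true] at h
      simp [h, ih]

theorem pvFlagLoop_eq (cs : List Char) :
    pvFlagLoop cs = (cs.any pvIsUpperCase, cs.any (fun c => !pvIsUpperCase c)) := by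
  simpa using pvFlagLoop_acc cs false false

-- ===== VERDICT (by name: the statement is the Claim_ definition above) =====
theorem hasCorrectCapitalization_spec : Claim_equal_hasCorrectCapitalization := by
  intro str _
  unfold Spec_hasCorrectCapitalization hasCorrectCapitalization hasCorrectCapitalization_alt
  simp only
  rcases hcs : str.toList with _ | ⟨c0, _ | ⟨d, t⟩⟩
  · simp
  · simp
  · simp only [List.length_cons]
    have hlen : ¬ (t.length + 1 + 1 ≤ 1) := by omega
    simp only [hlen, if_false]
    simp only [pvFlagLoop_eq, List.drop_one, List.tail_cons,
      List.all_eq_not_any_not, Bool.not_not]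
    have hne : ((d :: t).any pvIsUpperCase || (d :: t).any (fun c => !pvIsUpperCase c)) = true := by
      cases h : pvIsUpperCase d <;> simp [List.any_cons, h]
    cases h0 : pvIsUpperCase c0 <;>
      cases ht : (d :: t).any pvIsUpperCase <;>
      cases hl : (d :: t).any (fun c => !pvIsUpperCase c) <;>
      simp_all
    intro hdt
    rcases hl with h | h
    · exact absurd hdt (by simp [h])
    · exact h
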